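-- pv_equiv track=rewrite | github.com/pranavsaid/Satellite-Image-Retrieval- | getQuadKey.py | tilexyztoquad
-- ===== SOURCE A (Python) =====
-- def tilexyztoquad(x,y,z):
--     quad = ""
--     for i in range(z, 0, -1):
--         digit = '0'
--         mask = (1 << (i - 1)) & 0xffffffff  # python int is not size-fixed
--
--         if (x & mask) != 0:
--             digit = chr(ord(digit) + 1)
--         if (y & mask) != 0:
--             digit = chr(ord(digit) + 1)
--             digit = chr(ord(digit) + 1)
--         quad += digit
--     return quad
-- ===== SOURCE B (Python) =====
-- def tilexyztoquad(x, y, z):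
--     # One pass interleaves the low 32 bits of x and y into a Morton integer m;
--     # a second pass peels z base-4 digits off m (MSB first via reverse).
--     x &= 0xffffffff
--     y &= 0xffffffff
--     n = min(z, 32)
--     m = 0
--     for i in range(n):
--         m += ((x >> i) & 1) << (2 * i)
--         m += ((y >> i) & 1) << (2 * i + 1)
--     digits = []
--     for _ in range(n):
--         digits.append(chr(48 + (m & 3)))
--         m >>= 2
--     digits.reverse()
--     return "0" * (z - n) + "".join(digits)
-- ===== Notes on version B (the rewrite author's own statement) =====
-- stated objective: faster
-- what changed: A emits each quadkey digit by masking one bit of x and y per Python loop iteration MSB-first over all z levels; B interleaves the low 32 bits of x and y into a single Morton-code integer in one pass of at most 32 iterations, then extracts its base-4 digits LSB-first with mask/shift in a second pass and reverses, covering all positions >= 32 (where A's 32-bit mask forces '0') with one bulk '0'*k string fill.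
import Mathlib
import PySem

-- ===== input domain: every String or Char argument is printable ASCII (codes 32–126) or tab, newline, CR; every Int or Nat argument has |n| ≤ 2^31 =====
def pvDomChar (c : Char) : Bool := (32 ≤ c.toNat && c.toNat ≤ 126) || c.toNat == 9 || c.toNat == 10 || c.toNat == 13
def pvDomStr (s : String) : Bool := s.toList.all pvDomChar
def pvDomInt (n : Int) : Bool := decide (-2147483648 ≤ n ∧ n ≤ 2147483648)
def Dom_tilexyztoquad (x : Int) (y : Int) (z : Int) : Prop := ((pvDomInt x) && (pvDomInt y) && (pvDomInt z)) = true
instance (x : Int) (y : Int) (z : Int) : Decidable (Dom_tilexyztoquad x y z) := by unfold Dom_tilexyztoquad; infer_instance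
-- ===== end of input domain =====

-- B interleaves the low 32 bits of x and y into one Morton integer, then peels base-4
-- digits off it in a second pass; same return value as A, different decomposition.

-- ===== PORT A =====
-- loop body of A (helper for the fold); 'i - 1 ≥ 0' inside range(z, 0, -1), so .toNat is exact
def tqDigitA (x : Int) (y : Int) (i : Int) : Char :=
  let digit := '0'
  let mask := PySem.Int.band ((1 : Int) <<< (i - 1).toNat) 4294967295
  let digit := if PySem.Int.band x mask ≠ 0 then Char.ofNat (digit.toNat + 1) else digit
  let digit := if PySem.Int.band y mask ≠ 0 then
      Char.ofNat ((Char.ofNat (digit.toNat + 1)).toNat + 1) else digit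
  digit

def tilexyztoquad (x : Int) (y : Int) (z : Int) : String :=
  String.ofList ((PySem.List.pyRange z 0 (-1)).foldl (fun quad i => quad ++ [tqDigitA x y i]) [])

-- ===== PORT B =====
def tilexyztoquad_alt (x : Int) (y : Int) (z : Int) : String :=
  let x' := PySem.Int.band x 4294967295
  let y' := PySem.Int.band y 4294967295
  let n := min z 32
  -- loop indices i are ≥ 0, so .toNat on the shift amounts is exact
  let m := (PySem.List.pyRange 0 n 1).foldl (fun m i =>
      let m := m + (PySem.Int.band (x' >>> i.toNat) 1) <<< (2 * i).toNat
      m + (PySem.Int.band (y' >>> i.toNat) 1) <<< (2 * i + 1).toNat) 0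
  let p := (PySem.List.pyRange 0 n 1).foldl
      (fun (p : List Char × Int) _ =>
        (p.1 ++ [Char.ofNat (48 + PySem.Int.band p.2 3).toNat], p.2 >>> (2 : Nat))) ([], m)
  String.ofList (List.replicate (z - n).toNat '0' ++ p.1.reverse)

-- ===== PRECONDITION & SPEC =====
def Spec_tilexyztoquad (x : Int) (y : Int) (z : Int) (out : String) : Prop := out = tilexyztoquad_alt x y z
instance (x : Int) (y : Int) (z : Int) (out : String) : Decidable (Spec_tilexyztoquad x y z out) := by unfold Spec_tilexyztoquad; infer_instance

-- ===== CLAIM (what is proved, stated in full; the proofs are below) =====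
def Claim_equal_tilexyztoquad : Prop := ∀ (x : Int) (y : Int) (z : Int), Dom_tilexyztoquad x y z → Spec_tilexyztoquad x y z (tilexyztoquad x y z)

-- ===== LEMMAS AND PROOFS =====

-- the low 32 bits of v, as the Nat that B's masking computes
def pvX (v : Int) : Nat := (PySem.Int.band v 4294967295).toNat

-- the base-4 digit of the Morton code at bit position j
def pvD (x : Int) (y : Int) (j : Nat) : Nat :=
  (Nat.testBit (pvX x) j).toNat + 2 * (Nat.testBit (pvX y) j).toNat

lemma band32_nonneg (v : Int) : 0 ≤ PySem.Int.band v 4294967295 := by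
  rw [PySem.Int.band_comm]
  exact PySem.Int.band_nonneg_of_nonneg_left v (by norm_num)

lemma band32_eq_pvX (v : Int) : PySem.Int.band v 4294967295 = (pvX v : Int) := by
  simp [pvX, Int.toNat_of_nonneg (band32_nonneg v)]

lemma nat_and_mask (a : Nat) : a &&& 4294967295 = a % 4294967296 := by
  have := Nat.and_two_pow_sub_one_eq_mod a 32
  norm_num at this
  omega

lemma pvX_neg (v : Int) (hv : v < 0) :
    pvX v = 4294967296 - ((-v - 1).toNat % 4294967296 + 1) := by
  rw [pvX, PySem.Int.band.eq_1, if_neg (by omega), if_pos (by norm_num)]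
  rw [show (4294967295 : Int).toNat = 4294967295 from rfl]
  simp only [Int.toNat_natCast]
  rw [Nat.land_comm, nat_and_mask]
  have := Nat.mod_lt (-v - 1).toNat (by norm_num : 0 < 4294967296)
  omega

lemma pvX_pos (v : Int) (hv : 0 ≤ v) : pvX v = v.toNat % 4294967296 := by
  rw [pvX, PySem.Int.band.eq_1, if_pos hv, if_pos (by norm_num)]
  rw [show (4294967295 : Int).toNat = 4294967295 from rfl]
  simp only [Int.toNat_natCast]
  exact nat_and_mask v.toNat

lemma mask_hi (j : Nat) (hj : 32 ≤ j) : PySem.Int.band ((1 : Int) <<< j) 4294967295 = 0 := by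
  have h1 : ((1 : Int) <<< j) = ((1 <<< j : Nat) : Int) := by
    rw [Int.natCast_shiftLeft]; norm_num
  rw [h1, show ((4294967295 : Int)) = ((4294967295 : Nat) : Int) from rfl,
    PySem.Int.band_natCast, nat_and_mask, Nat.shiftLeft_eq, one_mul]
  have hdvd : (2 : Nat) ^ 32 ∣ 2 ^ j := pow_dvd_pow 2 hj
  obtain ⟨c, hc⟩ := hdvd
  norm_num at hc
  omega

lemma mask_lo (j : Nat) (hj : j < 32) :
    PySem.Int.band ((1 : Int) <<< j) 4294967295 = ((2 ^ j : Nat) : Int) := by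
  have h1 : ((1 : Int) <<< j) = ((1 <<< j : Nat) : Int) := by
    rw [Int.natCast_shiftLeft]; norm_num
  rw [h1, show ((4294967295 : Int)) = ((4294967295 : Nat) : Int) from rfl,
    PySem.Int.band_natCast, nat_and_mask, Nat.shiftLeft_eq, one_mul]
  congr 1
  exact Nat.mod_eq_of_lt (by
    calc (2:Nat)^j < 2^32 := Nat.pow_lt_pow_right (by norm_num) hj
      _ = 4294967296 := by norm_num)

lemma bit_iff (v : Int) (j : Nat) (hj : j < 32) :
    (PySem.Int.band v ((2 ^ j : Nat) : Int) ≠ 0) ↔ Nat.testBit (pvX v) j = true := by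
  rcases Int.lt_or_le v 0 with hv | hv
  · rw [PySem.Int.band.eq_1, if_neg (by omega), if_pos (by positivity), pvX_neg v hv]
    simp only [Int.toNat_natCast]
    rw [Nat.two_pow_and]
    have hlt : (-v - 1).toNat % 4294967296 < 2 ^ 32 := by
      have := Nat.mod_lt (-v - 1).toNat (by norm_num : 0 < 4294967296); omega
    rw [show (4294967296 : Nat) - ((-v - 1).toNat % 4294967296 + 1)
        = 2 ^ 32 - ((-v - 1).toNat % 4294967296 + 1) by norm_num]
    rw [Nat.testBit_two_pow_sub_succ hlt, show ((-v - 1).toNat % 4294967296)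
        = ((-v - 1).toNat % 2 ^ 32) by norm_num, Nat.testBit_mod_two_pow]
    cases hb : Nat.testBit (-v - 1).toNat j <;> simp [hj]
  · rw [PySem.Int.band.eq_1, if_pos hv, if_pos (by positivity), pvX_pos v hv]
    simp only [Int.toNat_natCast]
    rw [Nat.and_two_pow, show (v.toNat % 4294967296) = (v.toNat % 2 ^ 32) by norm_num,
      Nat.testBit_mod_two_pow]
    cases hb : Nat.testBit v.toNat j <;> simp [hj]

lemma digitA_lo (x y : Int) (j : Nat) (hj : j < 32) :
    tqDigitA x y (1 + (j : Int)) = Char.ofNat (48 + pvD x y j) := by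
  have h1 : ((1 + (j : Int)) - 1).toNat = j := by omega
  simp only [tqDigitA, h1, mask_lo j hj, bit_iff x j hj, bit_iff y j hj]
  cases hx : Nat.testBit (pvX x) j <;> cases hy : Nat.testBit (pvX y) j <;>
    simp [pvD, hx, hy]

lemma digitA_hi (x y : Int) (i : Int) (hi : 32 < i) : tqDigitA x y i = '0' := by
  have h32 : 32 ≤ (i - 1).toNat := by omega
  simp only [tqDigitA, mask_hi _ h32, PySem.Int.band_zero]
  simp

lemma pvD_lt (x y : Int) (j : Nat) : pvD x y j < 4 := by
  unfold pvD; cases Nat.testBit (pvX x) j <;> cases Nat.testBit (pvX y) j <;> simp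

lemma morton (x y : Int) (nn : Nat) :
    (List.range nn).foldl (fun (m : Int) (k : Nat) =>
        (m + (PySem.Int.band (((pvX x : Nat) : Int) >>> k) 1) <<< (2 * k)) +
          (PySem.Int.band (((pvX y : Nat) : Int) >>> k) 1) <<< (2 * k + 1)) 0
      = ((Nat.ofDigits 4 ((List.range nn).map (pvD x y)) : Nat) : Int) := by
  induction nn with
  | zero => simp [Nat.ofDigits_nil]
  | succ k ih =>
    rw [List.range_succ, List.foldl_append, List.map_append, Nat.ofDigits_append]
    simp only [List.foldl_cons, List.foldl_nil, ih, List.map_cons, List.map_nil,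
      List.length_map, List.length_range]
    have bx : PySem.Int.band (((pvX x : Nat) : Int) >>> k) 1
        = ((Nat.testBit (pvX x) k).toNat : Int) := by
      rw [← Int.natCast_shiftRight, show (1 : Int) = ((1 : Nat) : Int) from rfl,
        PySem.Int.band_natCast, Nat.and_one_is_mod, Nat.shiftRight_eq_div_pow,
        Nat.toNat_testBit]
    have by' : PySem.Int.band (((pvX y : Nat) : Int) >>> k) 1
        = ((Nat.testBit (pvX y) k).toNat : Int) := by
      rw [← Int.natCast_shiftRight, show (1 : Int) = ((1 : Nat) : Int) from rfl,
        PySem.Int.band_natCast, Nat.and_one_is_mod, Nat.shiftRight_eq_div_pow,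
        Nat.toNat_testBit]
    rw [bx, by',
      show ((Nat.testBit (pvX x) k).toNat : Int) <<< (2 * k)
          = (((Nat.testBit (pvX x) k).toNat <<< (2 * k) : Nat) : Int) from
        (Int.natCast_shiftLeft _ _),
      show ((Nat.testBit (pvX y) k).toNat : Int) <<< (2 * k + 1)
          = (((Nat.testBit (pvX y) k).toNat <<< (2 * k + 1) : Nat) : Int) from
        (Int.natCast_shiftLeft _ _)]
    have hD : Nat.ofDigits 4 [pvD x y k] = pvD x y k := by
      simp [Nat.ofDigits_cons, Nat.ofDigits_nil]
    rw [hD]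
    simp only [Nat.shiftLeft_eq]
    unfold pvD
    push_cast
    have p1 : (2 : Int) ^ (2 * k) = 4 ^ k := by rw [pow_mul]; norm_num
    have p2 : (2 : Int) ^ (2 * k + 1) = 2 * 4 ^ k := by rw [pow_succ, p1]; ring
    rw [p1, p2]
    ring

lemma extract {α : Type} (L : List Nat) (hL : ∀ d ∈ L, d < 4) :
    ∀ (t : List α) (ds : List Char), t.length = L.length →
    t.foldl (fun (p : List Char × Int) _ =>
        (p.1 ++ [Char.ofNat (48 + PySem.Int.band p.2 3).toNat], p.2 >>> (2 : Nat)))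
      (ds, ((Nat.ofDigits 4 L : Nat) : Int))
      = (ds ++ L.map (fun d => Char.ofNat (48 + d)), 0) := by
  induction L with
  | nil =>
    intro t ds ht
    rw [List.length_nil, List.length_eq_zero_iff] at ht
    subst ht
    simp [Nat.ofDigits_nil]
  | cons d L ih =>
    intro t ds ht
    match t with
    | [] => simp at ht
    | a :: t' =>
      have hd : d < 4 := hL d List.mem_cons_self
      have ho : (Nat.ofDigits 4 (d :: L) : Nat) = d + 4 * Nat.ofDigits 4 L :=
        Nat.ofDigits_cons
      have hm : PySem.Int.band ((Nat.ofDigits 4 (d :: L) : Nat) : Int) 3 = (d : Int) := by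
        rw [show (3 : Int) = ((3 : Nat) : Int) from rfl, PySem.Int.band_natCast, ho]
        have h3 : (d + 4 * Nat.ofDigits 4 L) &&& 3 = d := by
          have := Nat.and_two_pow_sub_one_eq_mod (d + 4 * Nat.ofDigits 4 L) 2
          norm_num at this
          omega
        rw [h3]
      have hs : (((Nat.ofDigits 4 (d :: L) : Nat) : Int) >>> (2 : Nat) : Int)
          = ((Nat.ofDigits 4 L : Nat) : Int) := by
        rw [← Int.natCast_shiftRight, ho]; congr 1
        rw [Nat.shiftRight_eq_div_pow]; omega
      simp only [List.foldl_cons, hm, hs]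
      have hc : ((48 : Int) + (d : Int)).toNat = 48 + d := by omega
      rw [hc, ih (fun e he => hL e (List.mem_cons_of_mem _ he)) t'
        (ds ++ [Char.ofNat (48 + d)]) (by simpa using ht)]
      simp [List.append_assoc]

-- ===== VERDICT (by name: the statement is the Claim_ definition above) =====
theorem tilexyztoquad_spec : Claim_equal_tilexyztoquad := by
  intro x y z _
  show tilexyztoquad x y z = tilexyztoquad_alt x y z
  by_cases hz : z ≤ 0
  · rw [tilexyztoquad, tilexyztoquad_alt]
    simp only [min_eq_left (show z ≤ 32 by omega)]
    rw [PySem.List.pyRange_neg_one_eq_nil hz, PySem.List.pyRange_one_eq_nil hz]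
    simp
  · replace hz : 0 < z := by omega
    have hn0 : (0 : Int) < min z 32 := lt_min hz (by norm_num)
    set nn : Nat := (min z 32).toNat with hnn
    have hcast : (nn : Int) = min z 32 := Int.toNat_of_nonneg (by omega)
    have hnn32 : nn ≤ 32 := by omega
    -- A's side: a map over the countdown range, split at min z 32
    rw [tilexyztoquad]
    rw [PySem.List.foldl_append_singleton_eq_map (tqDigitA x y), List.nil_append]
    rw [PySem.List.pyRange_neg_one_eq_reverse, show (0 : Int) + 1 = 1 from rfl]
    rw [PySem.List.pyRange_one_append 1 (min z 32 + 1) (z + 1) (by omega) (by omega)]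
    rw [List.map_reverse, List.map_append, List.reverse_append]
    have hhi : List.map (tqDigitA x y) (PySem.List.pyRange (min z 32 + 1) (z + 1))
        = List.replicate (z - min z 32).toNat '0' := by
      have hall : ∀ c ∈ List.map (tqDigitA x y) (PySem.List.pyRange (min z 32 + 1) (z + 1)),
          c = '0' := by
        intro c hc
        simp only [List.mem_map] at hc
        obtain ⟨i, hi, rfl⟩ := hc
        rw [PySem.List.mem_pyRange_one] at hi
        exact digitA_hi x y i (by omega)
      rw [List.eq_replicate_of_mem hall, List.length_map, PySem.List.length_pyRange_one]
      congr 1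
      omega
    have hlo : List.map (tqDigitA x y) (PySem.List.pyRange 1 (min z 32 + 1))
        = List.map (fun k => Char.ofNat (48 + pvD x y k)) (List.range nn) := by
      rw [PySem.List.pyRange_one 1 (min z 32 + 1), List.map_map,
        show (min z 32 + 1 - 1).toNat = nn by omega]
      apply List.map_congr_left
      intro k hk
      simp only [List.mem_range] at hk
      exact digitA_lo x y k (by omega)
    rw [hhi, hlo, List.reverse_replicate]
    -- B's side
    rw [tilexyztoquad_alt]
    simp only [band32_eq_pvX]
    have hrange : PySem.List.pyRange 0 (min z 32) 1
        = List.map (fun (k : Nat) => (k : Int)) (List.range nn) := by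
      rw [← hcast]
      exact PySem.List.pyRange_zero_nat nn
    rw [hrange, List.foldl_map, List.foldl_map]
    have hmfold : (List.range nn).foldl (fun (m : Int) (k : Nat) =>
        (m + (PySem.Int.band (((pvX x : Nat) : Int) >>> ((((k : Int)).toNat : Nat) : Int)) 1) <<< (((2 * (k : Int)).toNat : Nat) : Int))
          + (PySem.Int.band (((pvX y : Nat) : Int) >>> ((((k : Int)).toNat : Nat) : Int)) 1) <<< (((2 * (k : Int) + 1).toNat : Nat) : Int)) 0
        = ((Nat.ofDigits 4 ((List.range nn).map (pvD x y)) : Nat) : Int) := by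
      rw [show (fun (m : Int) (k : Nat) =>
          (m + (PySem.Int.band (((pvX x : Nat) : Int) >>> ((((k : Int)).toNat : Nat) : Int)) 1) <<< (((2 * (k : Int)).toNat : Nat) : Int))
            + (PySem.Int.band (((pvX y : Nat) : Int) >>> ((((k : Int)).toNat : Nat) : Int)) 1) <<< (((2 * (k : Int) + 1).toNat : Nat) : Int))
          = (fun (m : Int) (k : Nat) =>
          (m + (PySem.Int.band (((pvX x : Nat) : Int) >>> k) 1) <<< (2 * k))
            + (PySem.Int.band (((pvX y : Nat) : Int) >>> k) 1) <<< (2 * k + 1)) from by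
        funext m k
        simp only [Int.shiftRight_natCast_right, Int.shiftLeft_natCast_right]
        rw [show ((k : Int)).toNat = k by omega, show (2 * (k : Int)).toNat = 2 * k by omega,
          show (2 * (k : Int) + 1).toNat = 2 * k + 1 by omega]]
      exact morton x y nn
    rw [hmfold]
    rw [extract ((List.range nn).map (pvD x y))
      (by intro d hd; simp only [List.mem_map] at hd; obtain ⟨j, _, rfl⟩ := hd; exact pvD_lt x y j)
      (List.range nn) []
      (by simp)]
    rw [List.nil_append, List.map_map]
    rfl
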